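-- pv_equiv track=rewrite | github.com/ervanalb/arcade | src/old/pga_gen.py | fix_float
-- ===== SOURCE A (Python) =====
-- def fix_float(s):
--     """ Replaces bare "0" with "0." for rust. """
--
--     def fix(term):
--         import sys
--         out = ""
--         i = 0
--         needs_dot = False
--         while i < len(term) and term[i] in "(0123456789.-":
--             if term[i] in "0123456789":
--                 needs_dot = True
--             if term[i] in ".":
--                 needs_dot = False
--                 break
--
--             out += term[i]
--             i += 1
--         if needs_dot:
--             out += "." + term[i:]
--         else:
--             out = term
--         return out
--
--     return " ".join(fix(term) for term in s.split(" "))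
-- ===== SOURCE B (Python) =====
-- def fix_float(s):
--     """ Replaces bare "0" with "0." for rust. """
--
--     def fix(term):
--         rest = term.lstrip("(-0123456789")
--         prefix = term[:len(term) - len(rest)]
--         if any(c in "0123456789" for c in prefix) and not rest.startswith("."):
--             return prefix + "." + rest
--         return term
--
--     return " ".join(fix(t) for t in s.split(" "))
-- ===== Notes on version B (the rewrite author's own statement) =====
-- stated objective: simpler
-- what changed: Replaces A's index-driven scan that interleaves copying with a needs_dot flag and a break by an extract-then-decide decomposition: strip the maximal '(-digits' prefix, then insert the dot iff the prefix contains a digit and the remainder does not start with '.'.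
import Mathlib
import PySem

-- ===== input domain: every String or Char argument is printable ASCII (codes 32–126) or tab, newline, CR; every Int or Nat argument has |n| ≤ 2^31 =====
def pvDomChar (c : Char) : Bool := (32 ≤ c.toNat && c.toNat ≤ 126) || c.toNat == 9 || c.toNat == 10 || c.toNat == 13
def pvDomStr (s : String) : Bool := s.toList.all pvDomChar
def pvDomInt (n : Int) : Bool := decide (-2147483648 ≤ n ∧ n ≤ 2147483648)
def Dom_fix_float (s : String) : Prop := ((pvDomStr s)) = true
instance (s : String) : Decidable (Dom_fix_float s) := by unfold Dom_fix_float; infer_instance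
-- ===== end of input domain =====

-- B replaces A's interleaved scan-with-flag-and-break by a simpler strip-prefix-then-decide decomposition; same result, same cost.

-- ===== PORT A =====
-- the while loop of A's inner fix: state (out, term[i:], needs_dot); returns the state at loop exit
def pvFixLoopA : List Char → List Char → Bool → (List Char × List Char × Bool)
  | out, [], nd => (out, [], nd)
  | out, c :: rest, nd =>
    if ("(0123456789.-".toList.contains c) then
      let nd1 := if ("0123456789".toList.contains c) then true else nd
      if (".".toList.contains c) then (out, c :: rest, false)
      else pvFixLoopA (out ++ [c]) rest nd1
    else (out, c :: rest, nd)

def pvFixA (term : List Char) : List Char :=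
  let r := pvFixLoopA [] term false
  if r.2.2 then r.1 ++ '.' :: r.2.1 else term

def fix_float (s : String) : String :=
  String.ofList (PySem.Chars.join " ".toList ((PySem.Chars.splitOn s.toList " ".toList).map pvFixA))

-- ===== PORT B =====
def pvClsB (c : Char) : Bool := "(-0123456789".toList.contains c

-- Source B's fix: rest = term.lstrip("(-0123456789") (drop the maximal leading run of those
-- chars), pre = the dropped part; insert '.' iff pre has a digit and rest lacks a leading '.'
def pvFixB (term : List Char) : List Char :=
  let rest := term.dropWhile pvClsB
  let pre := term.takeWhile pvClsB
  if pre.any (fun c => "0123456789".toList.contains c) && !(rest.head? == some '.') then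
    pre ++ '.' :: rest
  else term

def fix_float_alt (s : String) : String :=
  String.ofList (PySem.Chars.join " ".toList ((PySem.Chars.splitOn s.toList " ".toList).map pvFixB))

-- ===== PRECONDITION & SPEC =====
def Spec_fix_float (s : String) (out : String) : Prop := out = fix_float_alt s
instance (s : String) (out : String) : Decidable (Spec_fix_float s out) := by unfold Spec_fix_float; infer_instance

-- ===== CLAIM (what is proved, stated in full; the proofs are below) =====
def Claim_equal_fix_float : Prop := ∀ (s : String), Dom_fix_float s → Spec_fix_float s (fix_float s)

-- ===== LEMMAS AND PROOFS =====

-- A's scanned character class is B's class plus '.'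
theorem pvCls_split (c : Char) : ("(0123456789.-".toList.contains c) = (pvClsB c || (c == '.')) := by
  simp only [pvClsB, show "(0123456789.-".toList = ['(', '0','1','2','3','4','5','6','7','8','9','.','-'] from rfl,
    show "(-0123456789".toList = ['(', '-','0','1','2','3','4','5','6','7','8','9'] from rfl,
    List.contains_cons, List.contains_nil]
  cases h0 : c == '(' <;> cases h1 : c == '-' <;> cases h2 : c == '.' <;> simp [Bool.or_comm]

theorem dotContains (c : Char) : (".".toList.contains c) = (c == '.') := by
  simp only [show ".".toList = ['.'] from rfl, List.contains_cons, List.contains_nil, Bool.or_false]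

-- A's loop, characterized by B's prefix/rest split
theorem pvFixLoopA_eq (l : List Char) : ∀ (out : List Char) (nd : Bool),
    pvFixLoopA out l nd =
      (out ++ l.takeWhile pvClsB, l.dropWhile pvClsB,
        if (l.dropWhile pvClsB).head? == some '.' then false
        else nd || (l.takeWhile pvClsB).any (fun c => "0123456789".toList.contains c)) := by
  induction l with
  | nil => intro out nd; simp [pvFixLoopA]
  | cons c rest ih =>
    intro out nd
    by_cases hB : pvClsB c = true
    · have hne : c ≠ '.' := by rintro rfl; exact absurd hB (by decide)
      have hdot : (c == '.') = false := by simpa using hne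
      unfold pvFixLoopA
      rw [pvCls_split, dotContains, hB, hdot]
      cases hd : ("0123456789".toList.contains c) <;>
        cases h : ((List.dropWhile pvClsB rest).head? == some '.') <;> cases nd <;>
          (simp [ih, h, List.takeWhile_cons_of_pos hB, List.dropWhile_cons_of_pos hB];
            try (simp at hd; tauto))
    · have hB' : pvClsB c = false := by simpa using hB
      have hBn : ¬ pvClsB c = true := by simp [hB']
      unfold pvFixLoopA
      rw [pvCls_split, dotContains, hB']
      cases hdot : (c == '.') <;>
        simp [hdot, List.takeWhile_cons_of_neg hBn, List.dropWhile_cons_of_neg hBn]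

theorem pvFix_eq (term : List Char) : pvFixA term = pvFixB term := by
  unfold pvFixA pvFixB
  rw [pvFixLoopA_eq]
  cases h : ((List.dropWhile pvClsB term).head? == some '.') <;>
    cases hd : ((List.takeWhile pvClsB term).any (fun c => "0123456789".toList.contains c)) <;>
      simp only [h, hd, Bool.false_or, Bool.not_true, Bool.not_false, Bool.and_true,
        Bool.and_false, List.nil_append, if_true, if_false, Bool.false_eq_true, ite_self]

-- ===== VERDICT (by name: the statement is the Claim_ definition above) =====
theorem fix_float_spec : Claim_equal_fix_float := by
  intro s _
  unfold Spec_fix_float fix_float fix_float_alt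
  exact congrArg _ (congrArg _ (List.map_congr_left (fun t _ => pvFix_eq t)))
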